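-- pv_equiv track=rewrite | github.com/blackbat13/ATLFormulaChecker | pollution_models/cracow_pollution_model.py | generate_new_formula2
-- ===== SOURCE A (Python) =====
-- def generate_new_formula2(no_drones, location_id):
--     coal = ""
--     for d in range(0, no_drones):
--         coal += str(d)
--         if d != no_drones - 1:
--             coal += ","
--
--     result = f"<<{coal}>> F "
--     lst = list()
--     for d in range(0, no_drones):
--         lst2 = list()
--         lst2.append(f"(loc{location_id}_{d} & polnew_{d})")
--         lst.append(lst2)
--
--     result += cformula2string(lst, 0)
--     return result
--
-- def dformula2string(disj, i):
--     if i == len(disj) - 1: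
--         return disj[i]
--     return "(" + disj[i] + " | " + dformula2string(disj, i + 1) + ")"
--
-- def cformula2string(conj, i):
--     if i == len(conj) - 1:
--         return dformula2string(conj[i], 0)
--     return "(" + dformula2string(conj[i], 0) + " | " + cformula2string(conj, i + 1) + ")"
-- ===== SOURCE B (Python) =====
-- def generate_new_formula2(no_drones, location_id):
--     coal = ",".join(str(d) for d in range(no_drones))
--     elems = [f"(loc{location_id}_{d} & polnew_{d})" for d in range(no_drones)]
--     acc = elems[-1]
--     for e in reversed(elems[:-1]):
--         acc = "(" + e + " | " + acc + ")"
--     return f"<<{coal}>> F " + acc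
-- ===== Notes on version B (the rewrite author's own statement) =====
-- stated objective: simpler
-- what changed: coal is built with ','.join instead of a per-element comma loop, and the two index-recursive helpers (cformula2string/dformula2string over a list of singleton lists) are replaced by one iterative right-fold over the flat list of leaf strings.
import Mathlib
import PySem

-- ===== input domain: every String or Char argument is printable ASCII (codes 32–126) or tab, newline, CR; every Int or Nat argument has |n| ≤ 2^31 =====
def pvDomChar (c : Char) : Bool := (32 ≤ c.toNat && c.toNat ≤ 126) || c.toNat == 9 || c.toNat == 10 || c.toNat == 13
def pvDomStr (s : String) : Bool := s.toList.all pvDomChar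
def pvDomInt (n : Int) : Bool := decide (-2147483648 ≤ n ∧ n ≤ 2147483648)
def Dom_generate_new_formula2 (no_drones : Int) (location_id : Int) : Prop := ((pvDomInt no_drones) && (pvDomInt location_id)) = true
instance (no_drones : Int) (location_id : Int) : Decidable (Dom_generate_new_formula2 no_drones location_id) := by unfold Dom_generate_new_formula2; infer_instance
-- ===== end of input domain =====

-- B replaces A's per-element comma loop by ','.join and A's two index-recursive
-- helpers by a single iterative right-fold over the flat list of leaf strings
-- (objective: simpler; same result, proved equal for no_drones ≥ 1, where A returns).

-- ===== PORT A =====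
-- f"(loc{location_id}_{d} & polnew_{d})" (shared leaf literal of both Pythons)
def pvLeaf (location_id d : Int) : String :=
  "(loc" ++ PySem.Int.toStr location_id ++ "_" ++ PySem.Int.toStr d ++ " & polnew_" ++ PySem.Int.toStr d ++ ")"

-- dformula2string, literal; the `none` branch is where Python raises IndexError
def pvDform (disj : List String) (i : Nat) : String :=
  if (i : Int) = (disj.length : Int) - 1 then (disj[i]?).getD ""
  else
    match h : disj[i]? with
    | none => ""  -- Python raises IndexError here
    | some s => "(" ++ s ++ " | " ++ pvDform disj (i + 1) ++ ")"
termination_by disj.length - i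
decreasing_by
  have : i < disj.length := (List.getElem?_eq_some_iff.mp h).1
  omega

-- cformula2string, literal; the `none` branch is where Python raises IndexError
def pvCform (conj : List (List String)) (i : Nat) : String :=
  if (i : Int) = (conj.length : Int) - 1 then pvDform ((conj[i]?).getD []) 0
  else
    match h : conj[i]? with
    | none => ""  -- Python raises IndexError here
    | some c => "(" ++ pvDform c 0 ++ " | " ++ pvCform conj (i + 1) ++ ")"
termination_by conj.length - i
decreasing_by
  have : i < conj.length := (List.getElem?_eq_some_iff.mp h).1
  omega

def generate_new_formula2 (no_drones : Int) (location_id : Int) : String :=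
  let coal := (PySem.List.pyRange 0 no_drones 1).foldl
    (fun coal d =>
      let coal := coal ++ PySem.Int.toStr d
      if d ≠ no_drones - 1 then coal ++ "," else coal) ""
  let result := "<<" ++ coal ++ ">> F "
  let lst := (PySem.List.pyRange 0 no_drones 1).foldl
    (fun lst d => lst ++ [[pvLeaf location_id d]]) ([] : List (List String))
  result ++ pvCform lst 0

-- ===== PORT B =====
def generate_new_formula2_alt (no_drones : Int) (location_id : Int) : String :=
  let coal := PySem.Str.join "," ((PySem.List.pyRange 0 no_drones 1).map PySem.Int.toStr)
  let elems := (PySem.List.pyRange 0 no_drones 1).map (pvLeaf location_id)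
  let acc := (elems.dropLast.reverse).foldl
    (fun acc e => "(" ++ e ++ " | " ++ acc ++ ")")
    ((PySem.List.pyGet? elems (-1)).getD "")
  "<<" ++ coal ++ ">> F " ++ acc

-- ===== PRECONDITION & SPEC =====
-- A raises IndexError (conj[0] in cformula2string on the empty list) for no_drones ≤ 0.
def Pre_generate_new_formula2 (no_drones : Int) (location_id : Int) : Prop := 1 ≤ no_drones
instance (no_drones : Int) (location_id : Int) : Decidable (Pre_generate_new_formula2 no_drones location_id) := by
  unfold Pre_generate_new_formula2; infer_instance

def pvWitness_generate_new_formula2 : Int × Int := (3, 7)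

def Spec_generate_new_formula2 (no_drones : Int) (location_id : Int) (out : String) : Prop := out = generate_new_formula2_alt no_drones location_id
instance (no_drones : Int) (location_id : Int) (out : String) : Decidable (Spec_generate_new_formula2 no_drones location_id out) := by unfold Spec_generate_new_formula2; infer_instance

-- ===== CLAIM (what is proved, stated in full; the proofs are below) =====
def Claim_equal_generate_new_formula2 : Prop := ∀ (no_drones : Int) (location_id : Int), Dom_generate_new_formula2 no_drones location_id → Pre_generate_new_formula2 no_drones location_id → Spec_generate_new_formula2 no_drones location_id (generate_new_formula2 no_drones location_id)

-- ===== LEMMAS AND PROOFS =====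

-- the common right-associated ( _ | _ ) nesting
def pvRight : List String → String
  | [] => ""
  | [s] => s
  | s :: t :: r => "(" ++ s ++ " | " ++ pvRight (t :: r) ++ ")"

theorem pvRight_cons (s : String) (t : List String) (h : t ≠ []) :
    pvRight (s :: t) = "(" ++ s ++ " | " ++ pvRight t ++ ")" := by
  cases t with
  | nil => exact absurd rfl h
  | cons a r => rfl

theorem pvJoin_singleton (sep a : String) : PySem.Str.join sep [a] = a := by
  apply String.toList_inj.mp
  simp [PySem.Str.toList_join, PySem.Chars.join_singleton]

theorem pvJoin_cons (sep a : String) (t : List String) (h : t ≠ []) :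
    PySem.Str.join sep (a :: t) = a ++ sep ++ PySem.Str.join sep t := by
  cases t with
  | nil => exact absurd rfl h
  | cons b r =>
    apply String.toList_inj.mp
    simp [PySem.Str.toList_join, PySem.Chars.join_cons_cons]

-- A's comma-appending fold over the non-last elements vs join
theorem pvJoin_foldl (l : List Int) (x c : String) :
    l.foldl (fun c d => c ++ PySem.Int.toStr d ++ ",") c ++ x
      = c ++ PySem.Str.join "," (l.map PySem.Int.toStr ++ [x]) := by
  induction l generalizing c with
  | nil => simp [pvJoin_singleton]
  | cons a t ih =>
    have hne : t.map PySem.Int.toStr ++ [x] ≠ [] := by simp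
    simp only [List.foldl_cons, List.map_cons, List.cons_append]
    rw [ih, pvJoin_cons _ _ _ hne]
    simp [String.append_assoc]

-- dformula2string on a singleton disjunct
theorem pvDform_singleton (s : String) : pvDform [s] 0 = s := by
  rw [pvDform]; simp

-- cformula2string over singleton lists computes the right-associated nesting
theorem pvCform_map_singleton (l : List String) (i : Nat) (hi : i < l.length) :
    pvCform (l.map (fun s => [s])) i = pvRight (l.drop i) := by
  rw [pvCform]
  have hlen : (l.map (fun s => [s])).length = l.length := by simp
  by_cases hlast : (i : Int) = (l.length : Int) - 1
  · have hi1 : i = l.length - 1 := by omega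
    rw [if_pos (by rw [hlen]; exact hlast)]
    have hg : (l.map (fun s => [s]))[i]? = some [l[i]] := by
      simp [List.getElem?_map, List.getElem?_eq_getElem hi]
    rw [hg]
    simp only [Option.getD_some, pvDform_singleton]
    rw [List.drop_eq_getElem_cons hi]
    have : l.drop (i + 1) = [] := by
      apply List.drop_eq_nil_of_le; omega
    rw [this]
    rfl
  · have hi1 : i + 1 < l.length := by omega
    rw [if_neg (by rw [hlen]; exact hlast)]
    have hg : (l.map (fun s => [s]))[i]? = some [l[i]] := by
      simp [List.getElem?_map, List.getElem?_eq_getElem hi]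
    rw [hg]
    simp only [pvDform_singleton]
    rw [pvCform_map_singleton l (i + 1) hi1]
    rw [List.drop_eq_getElem_cons hi]
    rw [pvRight_cons _ _ (by
      intro hnil
      have := congrArg List.length hnil
      simp at this
      omega)]
termination_by l.length - i

-- elems[-1] of a nonempty list is its last element
theorem pvGet_neg_one (l : List String) (h : l ≠ []) :
    (PySem.List.pyGet? l (-1)).getD "" = l.getLast h := by
  rw [PySem.List.pyGet?_neg_one, List.getLast?_eq_some_getLast h, Option.getD_some]

-- B's backwards loop over elems[:-1] computes the right-associated nesting
theorem pvFold_right (l : List String) (h : l ≠ []) :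
    (l.dropLast.reverse).foldl (fun acc e => "(" ++ e ++ " | " ++ acc ++ ")")
        ((PySem.List.pyGet? l (-1)).getD "")
      = pvRight l := by
  rw [List.foldl_reverse, pvGet_neg_one l h]
  induction l with
  | nil => exact absurd rfl h
  | cons a t ih =>
    cases t with
    | nil => rfl
    | cons b r =>
      have ht : (b :: r) ≠ [] := by simp
      rw [List.dropLast_cons₂, List.foldr_cons, List.getLast_cons (by simp), ih ht]
      rw [pvRight_cons _ _ ht]

theorem pvRange_ne_nil (n : Int) (hn : 1 ≤ n) : PySem.List.pyRange 0 n 1 ≠ [] := by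
  intro h
  have := congrArg List.length h
  rw [PySem.List.length_pyRange_one] at this
  simp at this
  omega

theorem generate_new_formula2_spec : Claim_equal_generate_new_formula2 := by
  intro n loc _hdom hpre
  unfold Spec_generate_new_formula2 generate_new_formula2 generate_new_formula2_alt
  dsimp only
  have hn : 1 ≤ n := hpre
  -- range split: range(0, n) = range(0, n-1) ++ [n-1]
  have hsplit : PySem.List.pyRange 0 n 1 = PySem.List.pyRange 0 (n - 1) 1 ++ [n - 1] := by
    have := PySem.List.pyRange_one_succ_right (a := 0) (b := n - 1) (by omega)
    simpa [sub_add_cancel] using this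
  -- coal equality
  have hcoal :
      (PySem.List.pyRange 0 n 1).foldl
        (fun coal d =>
          let coal := coal ++ PySem.Int.toStr d
          if d ≠ n - 1 then coal ++ "," else coal) ""
      = PySem.Str.join "," ((PySem.List.pyRange 0 n 1).map PySem.Int.toStr) := by
    rw [hsplit, List.foldl_append]
    simp only [List.foldl_cons, List.foldl_nil, List.map_append, List.map_cons, List.map_nil]
    rw [if_neg (by simp)]
    have hcongr :
        (PySem.List.pyRange 0 (n - 1) 1).foldl
          (fun coal d =>
            let coal := coal ++ PySem.Int.toStr d
            if d ≠ n - 1 then coal ++ "," else coal) ""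
        = (PySem.List.pyRange 0 (n - 1) 1).foldl
            (fun c d => c ++ PySem.Int.toStr d ++ ",") "" := by
      apply PySem.List.foldl_congr_mem
      intro acc x hx
      have hxlt : x < n - 1 := (PySem.List.mem_pyRange_one.mp hx).2
      simp only
      rw [if_pos (by omega)]
    rw [hcongr, pvJoin_foldl]
    simp
  rw [hcoal]
  -- lst is a map of singleton lists of leaves
  have hlst :
      (PySem.List.pyRange 0 n 1).foldl
        (fun lst d => lst ++ [[pvLeaf loc d]]) ([] : List (List String))
      = ((PySem.List.pyRange 0 n 1).map (pvLeaf loc)).map (fun s => [s]) := by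
    rw [PySem.List.foldl_append_singleton_eq_map]
    simp [List.map_map, Function.comp]
  rw [hlst]
  have hne : (PySem.List.pyRange 0 n 1).map (pvLeaf loc) ≠ [] := by
    simp [pvRange_ne_nil n hn]
  have hlen : 0 < ((PySem.List.pyRange 0 n 1).map (pvLeaf loc)).length :=
    List.length_pos_of_ne_nil hne
  rw [pvCform_map_singleton _ 0 hlen, pvFold_right _ hne]
  simp [String.append_assoc]
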